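-- pv_equiv track=rewrite | github.com/nissimbuchs/BATbern2 | update-speaker-emails.py | find_email
-- ===== SOURCE A (Python) =====
-- from typing import Dict, List, Optional
--
-- def normalize_name(name: str) -> str:
--     """Normalize name for matching (lowercase, remove extra spaces)."""
--     return ' '.join(name.lower().split())
--
-- def find_email(speaker_name: str, company_id: str, email_lookup: Dict) -> Optional[str]:
--     """
--     Find email for speaker by name and optionally company.
--     Returns email or None if not found.
--     """
--     normalized = normalize_name(speaker_name)
--
--     if normalized not in email_lookup:
--         return None
--
--     matches = email_lookup[normalized]
--
--     # If only one match, return it (if email exists)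
--     if len(matches) == 1:
--         return matches[0]['email'] if matches[0]['email'] else None
--
--     # Multiple matches - try to disambiguate by company
--     if company_id:
--         normalized_company = company_id.lower()
--         for match in matches:
--             if match['companyKey'] == normalized_company and match['email']:
--                 return match['email']
--
--     # If no company match, return first non-empty email
--     for match in matches:
--         if match['email']:
--             return match['email']
--
--     return None
-- ===== SOURCE B (Python) =====
-- def find_email(speaker_name, company_id, email_lookup):
--     normalized = ' '.join(speaker_name.lower().split())
--     if normalized not in email_lookup:
--         return None
--     nc = company_id.lower() if company_id else None
--     fallback = None
--     for m in email_lookup[normalized]: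
--         email = m.get('email')
--         if not email:
--             continue
--         if nc is not None and m.get('companyKey') == nc:
--             return email
--         if fallback is None:
--             fallback = email
--     return fallback
-- ===== Notes on version B (the rewrite author's own statement) =====
-- stated objective: simpler
-- what changed: Replaced A's single-match shortcut plus two separate scans (company pass, then first-nonempty-email pass) by one pass over the matches with an early return on a company hit and a first-nonempty-email fallback accumulator, reading fields with .get so B is total.
-- outside the precondition, e.g. on find_email('x', 'c', {'x': [{'email': 'a@x'}]}): A returns 'a@x', B returns 'a@x'
import Mathlib
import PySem

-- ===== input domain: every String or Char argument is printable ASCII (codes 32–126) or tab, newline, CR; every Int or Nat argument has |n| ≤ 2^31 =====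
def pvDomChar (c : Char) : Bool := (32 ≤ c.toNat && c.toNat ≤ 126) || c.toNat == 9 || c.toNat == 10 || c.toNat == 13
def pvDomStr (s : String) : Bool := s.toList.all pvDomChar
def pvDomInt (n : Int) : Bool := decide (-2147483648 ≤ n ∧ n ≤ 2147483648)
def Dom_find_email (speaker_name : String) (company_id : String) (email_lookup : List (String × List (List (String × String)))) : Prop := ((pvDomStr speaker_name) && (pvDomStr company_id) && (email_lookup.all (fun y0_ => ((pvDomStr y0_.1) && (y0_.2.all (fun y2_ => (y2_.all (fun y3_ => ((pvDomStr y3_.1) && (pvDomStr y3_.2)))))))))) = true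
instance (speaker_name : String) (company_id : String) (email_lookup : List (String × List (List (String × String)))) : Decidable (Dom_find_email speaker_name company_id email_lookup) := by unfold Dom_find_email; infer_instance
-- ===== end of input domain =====

-- B merges A's single-match shortcut and its two separate scans into one pass with a fallback accumulator; same return value on Pre_ (simpler, not faster).


-- ===== PORT A =====
-- normalize_name: ' '.join(name.lower().split())
def pvNormalize (name : String) : String :=
  PySem.Str.join " " (PySem.Str.split₀ (PySem.Str.lower name))

-- A's m['email'] / m['companyKey'] with the key present (guaranteed by Pre_): getD with "" default
-- is exact there ('' is also exactly Python's falsy email).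
def pvField (m : List (String × String)) (k : String) : String :=
  (PySem.Dict.mk m).getD k ""

def find_email (speaker_name : String) (company_id : String) (email_lookup : List (String × List (List (String × String)))) : Option String :=
  let normalized := pvNormalize speaker_name
  match (PySem.Dict.mk email_lookup).get? normalized with
  | none => none
  | some ms =>
    if ms.length = 1 then
      -- return ms[0]['email'] if ms[0]['email'] else None
      let e := pvField (ms.headD []) "email"
      if e ≠ "" then some e else none
    else
      -- first loop: disambiguate by company (early return ≙ findSome?)
      let byCompany : Option String :=
        if company_id ≠ "" then
          ms.findSome? (fun m =>
            if pvField m "companyKey" = PySem.Str.lower company_id ∧ pvField m "email" ≠ ""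
            then some (pvField m "email") else none)
        else none
      match byCompany with
      | some e => some e
      | none =>
        -- second loop: first non-empty email
        ms.findSome? (fun m =>
          if pvField m "email" ≠ "" then some (pvField m "email") else none)

-- ===== PORT B =====
-- one pass: early return on a company hit, fallback = first non-empty email.
-- Source B reads fields with m.get(k): ported as Dict.get?; 'not email' is exactly
-- (get? "email").getD "" = "" (None and '' are the falsy cases), and
-- "m.get('companyKey') == nc" (nc a string) is exactly get? "companyKey" = some nc.
def pvLoopB (ms : List (List (String × String))) (nc : Option String) (fallback : Option String) : Option String :=
  match ms with
  | [] => fallback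
  | m :: rest =>
    let email := ((PySem.Dict.mk m).get? "email").getD ""
    if email = "" then pvLoopB rest nc fallback
    else
      match nc with
      | some c =>
        if (PySem.Dict.mk m).get? "companyKey" = some c then some email
        else pvLoopB rest nc (fallback.orElse (fun _ => some email))
      | none => pvLoopB rest nc (fallback.orElse (fun _ => some email))

def find_email_alt (speaker_name : String) (company_id : String) (email_lookup : List (String × List (List (String × String)))) : Option String :=
  let normalized := pvNormalize speaker_name
  match (PySem.Dict.mk email_lookup).get? normalized with
  | none => none
  | some ms =>
    let nc : Option String := if company_id ≠ "" then some (PySem.Str.lower company_id) else none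
    pvLoopB ms nc none

-- ===== PRECONDITION & SPEC =====
-- Pre_ requires well-formed lookup data: every match record of the matched bucket carries both
-- the 'email' and the 'companyKey' key. Outside it A raises KeyError on the access paths that
-- reach the missing key; on the few such inputs where A still returns (it never read the missing
-- key, e.g. the single-match shortcut), B's .get-based pass returns the same value (see cites).
def Pre_find_email (speaker_name : String) (company_id : String) (email_lookup : List (String × List (List (String × String)))) : Prop :=
  ∀ m ∈ ((PySem.Dict.mk email_lookup).get? (pvNormalize speaker_name)).getD [],
    ((PySem.Dict.mk m).contains "email" = true ∧ (PySem.Dict.mk m).contains "companyKey" = true)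
instance (speaker_name : String) (company_id : String) (email_lookup : List (String × List (List (String × String)))) : Decidable (Pre_find_email speaker_name company_id email_lookup) := by unfold Pre_find_email; infer_instance

def pvWitness_find_email : String × String × (List (String × List (List (String × String)))) :=
  ("Ann  Lee", "ACME", [("ann lee", [[("email", "a@x"), ("companyKey", "acme")], [("email", "b@y"), ("companyKey", "zz")]])])

def Spec_find_email (speaker_name : String) (company_id : String) (email_lookup : List (String × List (List (String × String)))) (out : Option String) : Prop := out = find_email_alt speaker_name company_id email_lookup
instance (speaker_name : String) (company_id : String) (email_lookup : List (String × List (List (String × String)))) (out : Option String) : Decidable (Spec_find_email speaker_name company_id email_lookup out) := by unfold Spec_find_email; infer_instance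

-- ===== CLAIM (what is proved, stated in full; the proofs are below) =====
def Claim_equal_find_email : Prop := ∀ (speaker_name : String) (company_id : String) (email_lookup : List (String × List (List (String × String)))), Dom_find_email speaker_name company_id email_lookup → Pre_find_email speaker_name company_id email_lookup → Spec_find_email speaker_name company_id email_lookup (find_email speaker_name company_id email_lookup)

-- ===== LEMMAS AND PROOFS =====
-- On a record that has the 'companyKey' key, B's get?-test equals A's getD-test.
theorem pvCompanyTest (m : List (String × String)) (c : String)
    (h : (PySem.Dict.mk m).contains "companyKey" = true) :
    ((PySem.Dict.mk m).get? "companyKey" = some c) = (pvField m "companyKey" = c) := by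
  rw [PySem.Dict.contains_eq_isSome_get?] at h
  obtain ⟨k, hk⟩ := Option.isSome_iff_exists.mp h
  simp [pvField, PySem.Dict.getD_eq_get?_getD, hk]

-- B's get?-then-getD email equals A's getD email.
theorem pvEmailEq (m : List (String × String)) :
    ((PySem.Dict.mk m).get? "email").getD "" = pvField m "email" := by
  simp [pvField, PySem.Dict.getD_eq_get?_getD]

-- B's loop with a company, on records carrying 'companyKey': first company-and-email hit,
-- else fallback, else first non-empty email.
theorem pvLoopB_some (ms : List (List (String × String))) (c : String) (fb : Option String)
    (h : ∀ m ∈ ms, (PySem.Dict.mk m).contains "companyKey" = true) :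
    pvLoopB ms (some c) fb =
      ((ms.findSome? (fun m =>
          if pvField m "companyKey" = c ∧ pvField m "email" ≠ "" then some (pvField m "email") else none)).orElse
        (fun _ => fb.orElse (fun _ => ms.findSome? (fun m =>
          if pvField m "email" ≠ "" then some (pvField m "email") else none)))) := by
  induction ms generalizing fb with
  | nil => simp [pvLoopB]
  | cons m rest ih =>
    have hm := h m (List.mem_cons_self)
    have hrest : ∀ m' ∈ rest, (PySem.Dict.mk m').contains "companyKey" = true :=
      fun m' hm' => h m' (List.mem_cons_of_mem _ hm')
    have ih' := fun fb => ih fb hrest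
    simp only [pvLoopB, List.findSome?_cons, pvEmailEq, pvCompanyTest m c hm]
    by_cases he : pvField m "email" = "" <;> by_cases hc : pvField m "companyKey" = c <;>
      simp [he, hc, ih']

-- B's loop without a company: fallback, else first non-empty email.
theorem pvLoopB_none (ms : List (List (String × String))) (fb : Option String) :
    pvLoopB ms none fb =
      fb.orElse (fun _ => ms.findSome? (fun m =>
        if pvField m "email" ≠ "" then some (pvField m "email") else none)) := by
  induction ms generalizing fb with
  | nil => simp [pvLoopB]
  | cons m rest ih =>
    simp only [pvLoopB, List.findSome?_cons, pvEmailEq]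
    by_cases he : pvField m "email" = "" <;>
      simp [he, ih]

-- ===== VERDICT (by name: the statement is the Claim_ definition above) =====
theorem find_email_spec : Claim_equal_find_email := by
  intro sn cid lookup _ hpre
  unfold Spec_find_email find_email find_email_alt
  cases h : (PySem.Dict.mk lookup).get? (pvNormalize sn) with
  | none => simp [h]
  | some l =>
    unfold Pre_find_email at hpre
    rw [h] at hpre
    simp only [Option.getD_some] at hpre
    have hck : ∀ m ∈ l, (PySem.Dict.mk m).contains "companyKey" = true :=
      fun m hm => (hpre m hm).2
    by_cases hcid : cid = "" <;>
      simp only [h, hcid, ne_eq, not_true_eq_false, not_false_eq_true, if_true,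
        if_false, pvLoopB_none, pvLoopB_some _ _ _ hck, Option.orElse_none]
    -- no company: A's second scan = B's loop; the len==1 shortcut agrees with it on [m]
    · match l with
      | [] => simp
      | [m] => by_cases he : pvField m "email" = "" <;> simp [he, List.findSome?]
      | m :: m' :: rest => simp
    -- with a company: A's company scan then email scan = B's loop by pvLoopB_some
    · match l with
      | [] => simp
      | [m] =>
        by_cases he : pvField m "email" = "" <;>
          by_cases hc : pvField m "companyKey" = PySem.Str.lower cid <;>
            simp [he, hc, List.findSome?, Option.orElse]
      | m :: m' :: rest =>
        rw [if_neg (by simp : ¬ (m :: m' :: rest).length = 1)]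
        cases (m :: m' :: rest).findSome? (fun m =>
          if pvField m "companyKey" = PySem.Str.lower cid ∧ pvField m "email" ≠ ""
          then some (pvField m "email") else none) <;> simp [Option.orElse]
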